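-- pv_equiv track=rewrite | github.com/dariusnguyen/algorithm_data_structure_replit | dp/strings.py | count_construct_recur
-- ===== SOURCE A (Python) =====
-- def count_construct_recur(target, arr):
-- 	if target == '':
-- 		return 1
-- 	count = 0
-- 	for sub in arr:
-- 		if sub == target[:len(sub)]:
-- 			new_target = target[len(sub):]
-- 			count += count_construct_recur(new_target, arr)
-- 	return count
-- ===== SOURCE B (Python) =====
-- def count_construct_recur(target, arr):
--     n = len(target)
--     dp = [0] * (n + 1)
--     dp[n] = 1
--     for i in range(n - 1, -1, -1):
--         dp[i] = sum(dp[i + len(s)] for s in arr if target.startswith(s, i))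
--     return dp[0]
-- ===== Notes on version B (the rewrite author's own statement) =====
-- stated objective: alternative
-- what changed: Replaced A's exponential top-down recursion over remaining targets with a bottom-up dynamic-programming table dp[i] = number of ways to build the suffix target[i:], filled from the end in one pass.
import Mathlib
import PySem

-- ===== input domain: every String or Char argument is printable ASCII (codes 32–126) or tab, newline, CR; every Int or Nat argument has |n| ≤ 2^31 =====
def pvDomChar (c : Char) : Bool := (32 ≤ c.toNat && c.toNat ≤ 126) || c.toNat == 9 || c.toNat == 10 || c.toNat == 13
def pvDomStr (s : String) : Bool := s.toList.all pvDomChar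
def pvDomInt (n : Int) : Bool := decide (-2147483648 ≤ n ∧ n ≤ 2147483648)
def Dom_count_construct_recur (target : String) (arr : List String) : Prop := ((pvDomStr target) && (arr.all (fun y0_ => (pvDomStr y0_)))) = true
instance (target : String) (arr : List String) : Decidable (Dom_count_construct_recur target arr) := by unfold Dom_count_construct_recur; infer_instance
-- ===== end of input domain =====

-- B replaces A's top-down recursion over remaining targets with a bottom-up DP table over
-- suffix positions (objective: alternative algorithm).

-- ===== PORT A =====
-- A's recursion on the remaining target; the fuel only makes the (non-terminating outside
-- Pre_) Python recursion total: inside Pre_ every matched piece is nonempty, so the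
-- remaining length drops at every call and the fuel target.length + 1 is never exhausted.
def aGo (arr : List String) : Nat → List Char → Int
  | 0, _ => 0
  | fuel+1, t =>
    if t = [] then 1
    else
      arr.foldl (fun count sub =>
        if sub.toList = t.take sub.toList.length then
          count + aGo arr fuel (t.drop sub.toList.length)
        else count) 0

def count_construct_recur (target : String) (arr : List String) : Int :=
  aGo arr (target.toList.length + 1) target.toList

-- ===== PORT B =====
-- one loop iteration: dp[i] = sum(dp[i + len(s)] for s in arr if target.startswith(s, i))
def bStep (t : List Char) (arr : List String) (dp : List Int) (i : Nat) : List Int :=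
  dp.set i (arr.foldl (fun tot s =>
    if s.toList = (t.drop i).take s.toList.length then
      tot + dp.getD (i + s.toList.length) 0
    else tot) 0)

-- for i in range(n-1, -1, -1): processes indices i-1, i-2, …, 0
def bLoop (t : List Char) (arr : List String) : Nat → List Int → List Int
  | 0, dp => dp
  | i+1, dp => bLoop t arr i (bStep t arr dp i)

def count_construct_recur_alt (target : String) (arr : List String) : Int :=
  let t := target.toList
  let n := t.length
  let dp := (List.replicate (n + 1) (0 : Int)).set n 1
  (bLoop t arr n dp).getD 0 0

-- ===== PRECONDITION & SPEC =====
-- Pre_ excludes exactly the inputs where the Python A never returns: with '' in arr and a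
-- nonempty target, A recurses on an unchanged target and raises RecursionError.
def Pre_count_construct_recur (target : String) (arr : List String) : Prop :=
  target = "" ∨ "" ∉ arr
instance (target : String) (arr : List String) : Decidable (Pre_count_construct_recur target arr) := by unfold Pre_count_construct_recur; infer_instance

def pvWitness_count_construct_recur : String × List String := ("purple", ["purp", "p", "ur", "le", "purpl"])

def Spec_count_construct_recur (target : String) (arr : List String) (out : Int) : Prop := out = count_construct_recur_alt target arr
instance (target : String) (arr : List String) (out : Int) : Decidable (Spec_count_construct_recur target arr out) := by unfold Spec_count_construct_recur; infer_instance

-- ===== CLAIM (what is proved, stated in full; the proofs are below) =====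
def Claim_equal_count_construct_recur : Prop := ∀ (target : String) (arr : List String), Dom_count_construct_recur target arr → Pre_count_construct_recur target arr → Spec_count_construct_recur target arr (count_construct_recur target arr)

-- ===== LEMMAS AND PROOFS =====

theorem foldl_congr_mem' {α β : Type} (l : List α) (f g : β → α → β) (init : β)
    (h : ∀ (b : β) (a : α), a ∈ l → f b a = g b a) : l.foldl f init = l.foldl g init := by
  induction l generalizing init with
  | nil => rfl
  | cons x xs ih =>
    simp only [List.foldl_cons]
    rw [h init x (List.mem_cons_self), ih]
    intro b a ha; exact h b a (List.mem_cons_of_mem _ ha)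

-- unfolding of aGo on a nonempty remaining target
theorem aGo_succ (arr : List String) (fuel : Nat) (t : List Char) (ht : t ≠ []) :
    aGo arr (fuel + 1) t
      = arr.foldl (fun count sub =>
          if sub.toList = t.take sub.toList.length then
            count + aGo arr fuel (t.drop sub.toList.length)
          else count) 0 := by
  rw [aGo, if_neg ht]

-- a matched piece: its length is positive (pieces are nonempty) and at most |t|
theorem match_len {t : List Char} {s : String} (hs : s ≠ "")
    (h : s.toList = t.take s.toList.length) :
    1 ≤ s.toList.length ∧ s.toList.length ≤ t.length := by
  have hlt : s.toList.length = min s.toList.length t.length := by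
    conv_lhs => rw [h]
    exact List.length_take
  refine ⟨?_, by omega⟩
  cases hl : s.toList with
  | nil => exact absurd (String.ext hl) hs
  | cons a b => exact Nat.succ_le_succ (Nat.zero_le _)

theorem aGo_fuel {arr : List String} (hne : ∀ s ∈ arr, s ≠ "") :
    ∀ (f1 : Nat), ∀ (f2 : Nat) (t : List Char), t.length < f1 → t.length < f2 →
      aGo arr f1 t = aGo arr f2 t := by
  intro f1
  induction f1 with
  | zero => intro f2 t h1; omega
  | succ f ih =>
    intro f2 t h1 h2
    cases f2 with
    | zero => omega
    | succ g =>
      by_cases ht : t = []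
      · simp [aGo, ht]
      · rw [aGo_succ _ _ _ ht, aGo_succ _ _ _ ht]
        apply foldl_congr_mem'
        intro b s hs
        by_cases hc : s.toList = t.take s.toList.length
        · have hlen := match_len (hne s hs) hc
          rw [if_pos hc, if_pos hc,
            ih g (t.drop s.toList.length) (by rw [List.length_drop]; omega)
              (by rw [List.length_drop]; omega)]
        · rw [if_neg hc, if_neg hc]

theorem bLoop_inv {arr : List String} (hne : ∀ s ∈ arr, s ≠ "") (t : List Char) :
    ∀ (i : Nat) (dp : List Int), i ≤ t.length → dp.length = t.length + 1 →
      (∀ j, i ≤ j → j ≤ t.length →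
        dp.getD j 0 = aGo arr ((t.drop j).length + 1) (t.drop j)) →
      ∀ j, j ≤ t.length →
        (bLoop t arr i dp).getD j 0 = aGo arr ((t.drop j).length + 1) (t.drop j) := by
  intro i
  induction i with
  | zero =>
    intro dp _ _ hdp j hj
    exact hdp j (Nat.zero_le j) hj
  | succ i ih =>
    intro dp hi hlen hdp j hj
    show (bLoop t arr i (bStep t arr dp i)).getD j 0 = _
    refine ih (bStep t arr dp i) (by omega) (by simp [bStep, hlen]) ?_ j hj
    intro k hk1 hk2
    by_cases hki : k = i
    · subst hki
      have hset : (bStep t arr dp k).getD k 0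
          = arr.foldl (fun tot s =>
              if s.toList = (t.drop k).take s.toList.length then
                tot + dp.getD (k + s.toList.length) 0
              else tot) 0 := by
        unfold bStep
        rw [List.getD_eq_getElem?_getD, List.getElem?_set_self (by omega)]
        rfl
      rw [hset]
      have hne' : t.drop k ≠ [] := by
        intro h0
        have := congrArg List.length h0
        rw [List.length_drop] at this
        simp at this
        omega
      have hlenk : (t.drop k).length = t.length - k := List.length_drop
      conv_rhs => rw [aGo_succ arr (t.drop k).length (t.drop k) hne']
      apply foldl_congr_mem'
      intro b s hs
      by_cases hc : s.toList = (t.drop k).take s.toList.length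
      · have hlen2 := match_len (hne s hs) hc
        rw [hlenk] at hlen2
        rw [if_pos hc, if_pos hc]
        congr 1
        have hdd : (t.drop k).drop s.toList.length = t.drop (k + s.toList.length) := by
          rw [List.drop_drop]
        have hdp' := hdp (k + s.toList.length) (by omega) (by omega)
        rw [hdp', ← hdd]
        apply aGo_fuel hne <;> simp only [List.length_drop] <;> omega
      · rw [if_neg hc, if_neg hc]
    · have hunch : (bStep t arr dp i).getD k 0 = dp.getD k 0 := by
        unfold bStep
        rw [List.getD_eq_getElem?_getD, List.getElem?_set_ne (by omega),
          ← List.getD_eq_getElem?_getD]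
      rw [hunch]
      exact hdp k (by omega) hk2

-- ===== VERDICT (by name: the statement is the Claim_ definition above) =====
theorem count_construct_recur_spec : Claim_equal_count_construct_recur := by
  intro target arr _ hpre
  show count_construct_recur target arr = count_construct_recur_alt target arr
  rcases hpre with hemp | hne
  · subst hemp
    simp [count_construct_recur, count_construct_recur_alt, aGo, bLoop]
  · have hne' : ∀ s ∈ arr, s ≠ "" := fun s hs h0 => hne (h0 ▸ hs)
    unfold count_construct_recur count_construct_recur_alt
    simp only []
    have h0 : target.toList = target.toList.drop 0 := rfl
    rw [show target.toList.length + 1 = (target.toList.drop 0).length + 1 by rw [← h0]]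
    conv_lhs => rw [h0]
    refine (bLoop_inv hne' target.toList target.toList.length _ le_rfl (by simp) ?_ 0
      (Nat.zero_le _)).symm
    intro j hj1 hj2
    have hj : j = target.toList.length := le_antisymm hj2 hj1
    subst hj
    rw [List.getD_eq_getElem?_getD,
      List.getElem?_set_self (by simp), List.drop_length]
    rfl
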